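-- pv_equiv track=rewrite | github.com/bonvech/newborn | Supervizor/grimm_device.py | get_errors
-- ===== SOURCE A (Python) =====
-- def get_errors(wars):
--     warning = 0
--     try:
--         for war in wars:
--             warning |= war
--     except:
--         message = "Errors!! Unknown format of error!"
--         return message
--
--     message = ""
--     if warning & 1:
--         message += "Error 1. Condensate Outlet or Liquid Inlet. (Connect the respective bottle).\n"
--     if warning & 2:
--         message += "Error 2. Fan Error (To be checked by a service technician).\n"
--     if warning & 4:
--         message += "Error 4. 1-Wire-not OK (To be checked by a service technician).\n"
--     if warning & 8:
--         message += "Error 8. Liquidlevel not OK (Fill up external 1-Butanol reservoir).\n"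
--     if warning & 16:
--         message += "Error 16. Flow or Aerosolinlet or Underpressure or Pump not OK: "
--         message += "(Remove Saturator key from the aerosol inlet) or (Open bottle cap (LED green?)) or (Remove all protective caps).\n"
--     if warning & 32:
--         message += "Error 32. Temperature! (Terminate warm-up).\n"
--     if warning & 64:
--         message += "Error 64. Memo not OK (USB stick not recognized or USB stick capacity full).\n"
--     if warning & 128:
--         message += "Error 128. Fatal Error: Laser not OK (To be checked by a service technician).\n"
--     if warning & 512:
--         message += "Error 512. Low Pressure Check sample probe, Sample flow blocked Low ambient pressure).\n"
--     if warning & 1024: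
--         message += "Error 1024. Sheath Air Flow (Remove all protective caps).\n"
--
--     return message
-- ===== SOURCE B (Python) =====
-- _MESSAGES = {
--     1: "Error 1. Condensate Outlet or Liquid Inlet. (Connect the respective bottle).\n",
--     2: "Error 2. Fan Error (To be checked by a service technician).\n",
--     4: "Error 4. 1-Wire-not OK (To be checked by a service technician).\n",
--     8: "Error 8. Liquidlevel not OK (Fill up external 1-Butanol reservoir).\n",
--     16: "Error 16. Flow or Aerosolinlet or Underpressure or Pump not OK: "
--         "(Remove Saturator key from the aerosol inlet) or (Open bottle cap (LED green?)) or (Remove all protective caps).\n",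
--     32: "Error 32. Temperature! (Terminate warm-up).\n",
--     64: "Error 64. Memo not OK (USB stick not recognized or USB stick capacity full).\n",
--     128: "Error 128. Fatal Error: Laser not OK (To be checked by a service technician).\n",
--     512: "Error 512. Low Pressure Check sample probe, Sample flow blocked Low ambient pressure).\n",
--     1024: "Error 1024. Sheath Air Flow (Remove all protective caps).\n",
-- }
--
-- def get_errors(wars):
--     # A bit of the combined warning word is set iff SOME individual warning has
--     # that bit set, so skip the OR-reduction entirely: for each known error bit,
--     # scan the list with a short-circuiting any().
--     try:
--         return "".join(text for bit, text in _MESSAGES.items()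
--                        if any(war & bit for war in wars))
--     except:
--         return "Errors!! Unknown format of error!"
-- ===== Notes on version B (the rewrite author's own statement) =====
-- stated objective: alternative
-- what changed: Drops the OR-reduction accumulator entirely: for each known error bit B scans the warning list with a short-circuiting any(war & bit), since a bit of the OR is set iff some element has it, and joins the selected messages from a dict in one pass.
import Mathlib
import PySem

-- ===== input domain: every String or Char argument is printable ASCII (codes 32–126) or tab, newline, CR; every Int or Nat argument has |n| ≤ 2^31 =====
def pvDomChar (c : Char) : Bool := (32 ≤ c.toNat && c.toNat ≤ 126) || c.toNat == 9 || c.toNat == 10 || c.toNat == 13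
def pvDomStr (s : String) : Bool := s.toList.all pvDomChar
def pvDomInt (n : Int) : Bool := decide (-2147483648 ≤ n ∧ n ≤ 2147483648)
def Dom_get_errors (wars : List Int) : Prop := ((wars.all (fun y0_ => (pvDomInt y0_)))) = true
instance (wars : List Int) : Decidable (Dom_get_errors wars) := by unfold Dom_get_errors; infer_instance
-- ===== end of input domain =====

-- B drops A's OR-reduction accumulator: for each known error bit it scans the warning list with a
-- short-circuiting any(war & bit) — a bit of the OR is set iff some element has it — and joins the
-- selected messages (objective: alternative).
-- A's try/except never fires on List Int inputs (bitwise-or on ints cannot raise), so both ports omit it.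

-- ===== PORT A =====
def get_errors (wars : List Int) : String :=
  let warning : Int := wars.foldl (fun warning war => Int.lor warning war) 0
  let message : String := ""
  let message := if Int.land warning 1 ≠ 0 then message ++ "Error 1. Condensate Outlet or Liquid Inlet. (Connect the respective bottle).\n" else message
  let message := if Int.land warning 2 ≠ 0 then message ++ "Error 2. Fan Error (To be checked by a service technician).\n" else message
  let message := if Int.land warning 4 ≠ 0 then message ++ "Error 4. 1-Wire-not OK (To be checked by a service technician).\n" else message
  let message := if Int.land warning 8 ≠ 0 then message ++ "Error 8. Liquidlevel not OK (Fill up external 1-Butanol reservoir).\n" else message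
  let message := if Int.land warning 16 ≠ 0 then
      (message ++ "Error 16. Flow or Aerosolinlet or Underpressure or Pump not OK: ")
        ++ "(Remove Saturator key from the aerosol inlet) or (Open bottle cap (LED green?)) or (Remove all protective caps).\n"
    else message
  let message := if Int.land warning 32 ≠ 0 then message ++ "Error 32. Temperature! (Terminate warm-up).\n" else message
  let message := if Int.land warning 64 ≠ 0 then message ++ "Error 64. Memo not OK (USB stick not recognized or USB stick capacity full).\n" else message
  let message := if Int.land warning 128 ≠ 0 then message ++ "Error 128. Fatal Error: Laser not OK (To be checked by a service technician).\n" else message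
  let message := if Int.land warning 512 ≠ 0 then message ++ "Error 512. Low Pressure Check sample probe, Sample flow blocked Low ambient pressure).\n" else message
  let message := if Int.land warning 1024 ≠ 0 then message ++ "Error 1024. Sheath Air Flow (Remove all protective caps).\n" else message
  message

-- ===== PORT B =====
-- the module-level _MESSAGES dict of Source B (insertion order), as an association list
def errorTable : List (Int × String) :=
  [ (1, "Error 1. Condensate Outlet or Liquid Inlet. (Connect the respective bottle).\n"),
    (2, "Error 2. Fan Error (To be checked by a service technician).\n"),
    (4, "Error 4. 1-Wire-not OK (To be checked by a service technician).\n"),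
    (8, "Error 8. Liquidlevel not OK (Fill up external 1-Butanol reservoir).\n"),
    (16, "Error 16. Flow or Aerosolinlet or Underpressure or Pump not OK: " ++ "(Remove Saturator key from the aerosol inlet) or (Open bottle cap (LED green?)) or (Remove all protective caps).\n"),
    (32, "Error 32. Temperature! (Terminate warm-up).\n"),
    (64, "Error 64. Memo not OK (USB stick not recognized or USB stick capacity full).\n"),
    (128, "Error 128. Fatal Error: Laser not OK (To be checked by a service technician).\n"),
    (512, "Error 512. Low Pressure Check sample probe, Sample flow blocked Low ambient pressure).\n"),
    (1024, "Error 1024. Sheath Air Flow (Remove all protective caps).\n") ]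

-- "".join(text for bit, text in _MESSAGES.items() if any(war & bit for war in wars))
def get_errors_alt (wars : List Int) : String :=
  String.join ((errorTable.filter (fun mt => wars.any (fun war => Int.land war mt.1 != 0))).map Prod.snd)

-- ===== PRECONDITION & SPEC =====
def Spec_get_errors (wars : List Int) (out : String) : Prop := out = get_errors_alt wars
instance (wars : List Int) (out : String) : Decidable (Spec_get_errors wars out) := by unfold Spec_get_errors; infer_instance

-- ===== CLAIM (what is proved, stated in full; the proofs are below) =====
def Claim_equal_get_errors : Prop := ∀ (wars : List Int), Dom_get_errors wars → Spec_get_errors wars (get_errors wars)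

-- ===== LEMMAS AND PROOFS =====
theorem nat_or_zero (m n : Nat) : m ||| n = 0 ↔ m = 0 ∧ n = 0 := by
  constructor
  · intro h
    constructor <;> apply Nat.eq_of_testBit_eq <;> intro i <;>
      · have h2 := congrArg (Nat.testBit · i) h
        simp [Nat.testBit_or] at h2
        simp [h2]
  · rintro ⟨rfl, rfl⟩; rfl

theorem int_lor_zero (a b : Int) : Int.lor a b = 0 ↔ a = 0 ∧ b = 0 := by
  rcases a with m | m <;> rcases b with n | n <;> simp [Int.lor, nat_or_zero]

theorem land_lor_distrib (a b m : Int) : Int.land (Int.lor a b) m = Int.lor (Int.land a m) (Int.land b m) := by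
  rcases a with x | x <;> rcases b with y | y <;> rcases m with z | z <;>
    simp only [Int.lor, Int.land] <;>
    · congr 1
      apply Nat.eq_of_testBit_eq; intro i
      simp only [Nat.testBit_and, Nat.testBit_or, Nat.testBit_ldiff]
      cases x.testBit i <;> cases y.testBit i <;> cases z.testBit i <;> rfl

theorem zero_land (m : Int) : Int.land 0 m = 0 := by
  rcases m with z | z <;> simp only [show (0:Int) = Int.ofNat 0 from rfl, Int.land] <;>
    · congr 1
      apply Nat.eq_of_testBit_eq; intro i
      simp [Nat.testBit_ldiff]

-- a bit of the OR-accumulation is set iff the accumulator has it or some list element has it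
theorem bitfold (m : Int) (ws : List Int) : ∀ (acc : Int),
    (Int.land (ws.foldl (fun warning war => Int.lor warning war) acc) m ≠ 0) ↔
    (Int.land acc m ≠ 0 ∨ ws.any (fun war => Int.land war m != 0) = true) := by
  induction ws with
  | nil => intro acc; simp
  | cons w tl ih =>
    intro acc
    simp only [List.foldl_cons, List.any_cons, ih, land_lor_distrib, Ne, int_lor_zero,
      not_and_or, Bool.or_eq_true, bne_iff_ne]
    tauto

theorem foldl_str_append (l : List String) : ∀ (a : String),
    l.foldl (fun r s => r ++ s) a = a ++ l.foldl (fun r s => r ++ s) "" := by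
  induction l with
  | nil => intro a; simp
  | cons h t ih =>
    intro a
    simp only [List.foldl_cons]
    rw [ih (a ++ h), ih ("" ++ h), String.append_assoc]
    simp

theorem join_cons (a : String) (l : List String) : String.join (a :: l) = a ++ String.join l := by
  simp only [String.join, List.foldl_cons]
  rw [foldl_str_append]
  simp

-- an append-if fold over a table equals the join of the selected texts
theorem foldl_if_eq_join (p : Int × String → Bool) (l : List (Int × String)) : ∀ (s : String),
    l.foldl (fun msg mt => if p mt then msg ++ mt.2 else msg) s
    = s ++ String.join ((l.filter p).map Prod.snd) := by
  induction l with
  | nil => intro s; simp [String.join]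
  | cons h t ih =>
    intro s
    cases hp : p h <;> simp [hp, ih, join_cons, String.append_assoc]

-- ===== VERDICT (by name: the statement is the Claim_ definition above) =====
set_option maxRecDepth 4096 in
theorem get_errors_spec : Claim_equal_get_errors := by
  intro wars _
  show get_errors wars = get_errors_alt wars
  have hB : get_errors_alt wars
      = errorTable.foldl (fun msg mt => if (wars.any fun war => Int.land war mt.1 != 0) then msg ++ mt.2 else msg) "" := by
    rw [foldl_if_eq_join (fun mt => wars.any fun war => Int.land war mt.1 != 0) errorTable ""]
    simp [get_errors_alt]
  have hc : ∀ mask : Int,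
      (Int.land (wars.foldl (fun warning war => Int.lor warning war) 0) mask ≠ 0) ↔
      ((wars.any fun war => Int.land war mask != 0) = true) := by
    intro mask
    rw [bitfold]
    simp [zero_land]
  rw [hB]
  unfold get_errors
  simp only [hc]
  simp [errorTable, String.append_assoc]
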